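-- pv_equiv track=rewrite | github.com/ShashwatGupta2001/CrohnVsITB | fatratio/fr.algorithm.py | line_iter
-- ===== SOURCE A (Python) =====
-- def line_iter(start, end):
--     x0, y0 = start
--     x1, y1 = end
--     dx = abs(x1 - x0)
--     dy = abs(y1 - y0)
--     sx = 1 if x0 < x1 else -1
--     sy = 1 if y0 < y1 else -1
--     err = dx - dy
--     while True:
--         yield (x0, y0)
--         if x0 == x1 and y0 == y1:
--             break
--         e2 = 2 * err
--         if e2 > -dy:
--             err -= dy
--             x0 += sx
--         if e2 < dx:
--             err += dx
--             y0 += sy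
-- ===== SOURCE B (Python) =====
-- def line_iter(start, end):
--     x0, y0 = start
--     x1, y1 = end
--     dx = abs(x1 - x0)
--     dy = abs(y1 - y0)
--     sx = 1 if x0 < x1 else -1
--     sy = 1 if y0 < y1 else -1
--     if dx == 0 and dy == 0:
--         yield (x0, y0)
--     elif dx >= dy:
--         for i in range(dx + 1):
--             yield (x0 + sx * i, y0 + sy * ((2 * i * dy + dx - 1) // (2 * dx)))
--     else:
--         for i in range(dy + 1):
--             yield (x0 + sx * ((2 * i * dx + dy - 1) // (2 * dy)), y0 + sy * i)
-- ===== Notes on version B (the rewrite author's own statement) =====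
-- stated objective: alternative
-- what changed: B replaces the stateful error-accumulator Bresenham loop by a stateless closed-form: it picks the major axis once and emits each point directly, computing the minor coordinate by an integer floor-division interpolation formula, with no err/e2 state carried between points.
import Mathlib
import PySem

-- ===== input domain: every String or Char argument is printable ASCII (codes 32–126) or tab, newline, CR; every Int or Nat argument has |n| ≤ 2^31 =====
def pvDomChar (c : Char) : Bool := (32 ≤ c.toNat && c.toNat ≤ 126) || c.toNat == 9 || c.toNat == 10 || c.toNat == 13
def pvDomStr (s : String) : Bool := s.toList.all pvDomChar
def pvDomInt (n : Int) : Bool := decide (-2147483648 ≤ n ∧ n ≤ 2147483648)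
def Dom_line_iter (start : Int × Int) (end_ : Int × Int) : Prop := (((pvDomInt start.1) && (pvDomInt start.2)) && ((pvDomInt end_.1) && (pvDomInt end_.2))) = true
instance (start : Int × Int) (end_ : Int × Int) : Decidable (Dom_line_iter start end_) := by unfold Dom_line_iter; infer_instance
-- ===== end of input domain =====

-- B replaces A's stateful error-accumulator Bresenham loop by a stateless per-point
-- closed-form interpolation along the major axis (objective: alternative algorithm, same cost).

-- ===== PORT A =====
-- Python A is a generator; the port returns the list of all yielded points.
-- The while-True loop becomes fuel recursion; the fuel dx+dy+1 is an upper bound that only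
-- makes the recursion total (the proof shows the loop breaks before fuel runs out).
def lineLoopA (fuel : Nat) (x0 y0 x1 y1 dx dy sx sy err : Int) : List (Int × Int) :=
  match fuel with
  | 0 => []
  | fuel + 1 =>
    if x0 = x1 ∧ y0 = y1 then [(x0, y0)]
    else
      (x0, y0) ::
        lineLoopA fuel
          (if 2 * err > -dy then x0 + sx else x0)
          (if 2 * err < dx then y0 + sy else y0)
          x1 y1 dx dy sx sy
          (if 2 * err < dx then (if 2 * err > -dy then err - dy else err) + dx
           else (if 2 * err > -dy then err - dy else err))

def line_iter (start : Int × Int) (end_ : Int × Int) : List (Int × Int) :=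
  let x0 := start.1
  let y0 := start.2
  let x1 := end_.1
  let y1 := end_.2
  let dx := |x1 - x0|
  let dy := |y1 - y0|
  let sx : Int := if x0 < x1 then 1 else -1
  let sy : Int := if y0 < y1 then 1 else -1
  lineLoopA ((dx + dy).toNat + 1) x0 y0 x1 y1 dx dy sx sy (dx - dy)

-- ===== PORT B =====
def line_iter_alt (start : Int × Int) (end_ : Int × Int) : List (Int × Int) :=
  let x0 := start.1
  let y0 := start.2
  let x1 := end_.1
  let y1 := end_.2
  let dx := |x1 - x0|
  let dy := |y1 - y0|
  let sx : Int := if x0 < x1 then 1 else -1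
  let sy : Int := if y0 < y1 then 1 else -1
  if dx = 0 ∧ dy = 0 then [(x0, y0)]
  else if dx ≥ dy then
    (List.range (dx + 1).toNat).map (fun (i : Nat) =>
      (x0 + sx * (i : Int), y0 + sy * PySem.Int.floordiv (2 * (i : Int) * dy + dx - 1) (2 * dx)))
  else
    (List.range (dy + 1).toNat).map (fun (i : Nat) =>
      (x0 + sx * PySem.Int.floordiv (2 * (i : Int) * dx + dy - 1) (2 * dy), y0 + sy * (i : Int)))

-- ===== PRECONDITION & SPEC =====
def Spec_line_iter (start : Int × Int) (end_ : Int × Int) (out : List (Int × Int)) : Prop := out = line_iter_alt start end_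
instance (start : Int × Int) (end_ : Int × Int) (out : List (Int × Int)) : Decidable (Spec_line_iter start end_ out) := by unfold Spec_line_iter; infer_instance

-- ===== CLAIM (what is proved, stated in full; the proofs are below) =====
def Claim_equal_line_iter : Prop := ∀ (start : Int × Int) (end_ : Int × Int), Dom_line_iter start end_ → Spec_line_iter start end_ (line_iter start end_)

-- ===== LEMMAS AND PROOFS =====

theorem range_map_succ_shift {α : Type} (F : Nat → α) (n : Nat) :
    (List.range (n + 1)).map F = F 0 :: (List.range n).map (fun j => F (j + 1)) := by
  rw [List.range_succ_eq_map, List.map_cons, List.map_map]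
  exact congrArg _ (List.map_congr_left fun j _ => rfl)

-- the closed-form minor coordinate offset: after i major steps, the minor axis has advanced q dM dm i cells
def qmin (dM dm i : Int) : Int := PySem.Int.floordiv (2 * i * dm + dM - 1) (2 * dM)

theorem qmin_eq (dM dm i q : Int) (hdM : 0 < dM)
    (h1 : q * (2 * dM) ≤ 2 * i * dm + dM - 1) (h2 : 2 * i * dm + dM - 1 < (q + 1) * (2 * dM)) :
    qmin dM dm i = q := by
  unfold qmin
  exact (PySem.Int.floordiv_eq_iff_of_pos (by omega)).mpr ⟨h1, h2⟩

theorem qmin_bounds (dM dm i : Int) (hdM : 0 < dM) :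
    qmin dM dm i * (2 * dM) ≤ 2 * i * dm + dM - 1 ∧
      2 * i * dm + dM - 1 < (qmin dM dm i + 1) * (2 * dM) := by
  unfold qmin
  exact (PySem.Int.floordiv_eq_iff_of_pos (by omega)).mp rfl

theorem qmin_zero (dM dm : Int) (hdM : 0 < dM) : qmin dM dm 0 = 0 := by
  apply qmin_eq _ _ _ _ hdM <;> nlinarith

theorem qmin_last (dM dm : Int) (hdM : 0 < dM) : qmin dM dm dM = dm := by
  apply qmin_eq _ _ _ _ hdM <;> nlinarith

theorem qmin_diag (dM i : Int) (hdM : 0 < dM) (hi : 0 ≤ i) : qmin dM dM i = i := by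
  apply qmin_eq _ _ _ _ hdM <;> nlinarith

-- x-major invariant: from the state after i x-steps, A's loop produces exactly B's tail
theorem loopA_xmajor (x0 y0 sx sy dx dy : Int) (hdx : 0 < dx) (hdy : 0 ≤ dy) (hle : dy ≤ dx)
    (hsx : sx = 1 ∨ sx = -1) :
    ∀ (m fuel : Nat) (i : Int), (m : Int) + i = dx → 0 ≤ i → m < fuel →
      lineLoopA fuel (x0 + sx * i) (y0 + sy * qmin dx dy i) (x0 + sx * dx) (y0 + sy * dy)
          dx dy sx sy (dx - dy - i * dy + qmin dx dy i * dx)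
        = (List.range (m + 1)).map (fun (j : Nat) => (x0 + sx * (i + (j : Int)), y0 + sy * qmin dx dy (i + (j : Int)))) := by
  intro m
  induction m with
  | zero =>
    intro fuel i hi _ hfuel
    obtain ⟨fuel, rfl⟩ : ∃ f, fuel = f + 1 := ⟨fuel - 1, by omega⟩
    have hi' : i = dx := by omega
    rw [hi']
    simp [lineLoopA, List.range_succ, qmin_last dx dy hdx]
  | succ m ih =>
    intro fuel i hi hi0 hfuel
    obtain ⟨fuel, rfl⟩ : ∃ f, fuel = f + 1 := ⟨fuel - 1, by omega⟩
    have hilt : i < dx := by omega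
    have hne : ¬(x0 + sx * i = x0 + sx * dx ∧ y0 + sy * qmin dx dy i = y0 + sy * dy) := by
      rintro ⟨hx, -⟩
      rcases hsx with rfl | rfl <;> omega
    obtain ⟨h1, h2⟩ := qmin_bounds dx dy i hdx
    set q := qmin dx dy i with hqdef
    -- the x-step condition always fires in the x-major phase
    have hc1 : 2 * (dx - dy - i * dy + q * dx) > -dy := by
      rcases eq_or_lt_of_le hle with heq | hlt
      · have hq : q = i := by rw [hqdef, heq]; exact qmin_diag dx i hdx hi0
        rw [hq, heq]; nlinarith
      · nlinarith
    rw [lineLoopA, if_neg hne]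
    have hcast : ∀ j : Nat, i + ((j + 1 : Nat) : Int) = (i + 1) + (j : Int) := by
      intro j; push_cast; ring
    by_cases hc2 : 2 * (dx - dy - i * dy + q * dx) < dx
    · have hq1 : qmin dx dy (i + 1) = q + 1 := by
        apply qmin_eq _ _ _ _ hdx <;> nlinarith
      have key := ih fuel (i + 1) (by omega) (by omega) (by omega)
      rw [hq1] at key
      rw [if_pos hc1, if_pos hc2, if_pos hc2, if_pos hc1]
      rw [show x0 + sx * i + sx = x0 + sx * (i + 1) by ring,
          show y0 + sy * q + sy = y0 + sy * (q + 1) by ring,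
          show dx - dy - i * dy + q * dx - dy + dx = dx - dy - (i + 1) * dy + (q + 1) * dx by ring,
          key]
      conv_rhs => rw [range_map_succ_shift]
      congr 1
      · norm_num [hqdef]
      · refine List.map_congr_left ?_
        intro j _
        simp only [hcast]
    · have hq1 : qmin dx dy (i + 1) = q := by
        apply qmin_eq _ _ _ _ hdx <;> nlinarith
      have key := ih fuel (i + 1) (by omega) (by omega) (by omega)
      rw [hq1] at key
      rw [if_pos hc1, if_neg hc2, if_neg hc2, if_pos hc1]
      rw [show x0 + sx * i + sx = x0 + sx * (i + 1) by ring,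
          show dx - dy - i * dy + q * dx - dy = dx - dy - (i + 1) * dy + q * dx by ring,
          key]
      conv_rhs => rw [range_map_succ_shift]
      congr 1
      · norm_num [hqdef]
      · refine List.map_congr_left ?_
        intro j _
        simp only [hcast]

-- y-major invariant (dx < dy): symmetric, y steps every iteration
theorem loopA_ymajor (x0 y0 sx sy dx dy : Int) (hdy : 0 < dy) (hdx : 0 ≤ dx) (hlt : dx < dy)
    (hsy : sy = 1 ∨ sy = -1) :
    ∀ (m fuel : Nat) (i : Int), (m : Int) + i = dy → 0 ≤ i → m < fuel →
      lineLoopA fuel (x0 + sx * qmin dy dx i) (y0 + sy * i) (x0 + sx * dx) (y0 + sy * dy)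
          dx dy sx sy (dx - dy + i * dx - qmin dy dx i * dy)
        = (List.range (m + 1)).map (fun (j : Nat) => (x0 + sx * qmin dy dx (i + (j : Int)), y0 + sy * (i + (j : Int)))) := by
  intro m
  induction m with
  | zero =>
    intro fuel i hi _ hfuel
    obtain ⟨fuel, rfl⟩ : ∃ f, fuel = f + 1 := ⟨fuel - 1, by omega⟩
    have hi' : i = dy := by omega
    rw [hi']
    simp [lineLoopA, List.range_succ, qmin_last dy dx hdy]
  | succ m ih =>
    intro fuel i hi hi0 hfuel
    obtain ⟨fuel, rfl⟩ : ∃ f, fuel = f + 1 := ⟨fuel - 1, by omega⟩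
    have hilt : i < dy := by omega
    have hne : ¬(x0 + sx * qmin dy dx i = x0 + sx * dx ∧ y0 + sy * i = y0 + sy * dy) := by
      rintro ⟨-, hy⟩
      rcases hsy with rfl | rfl <;> omega
    obtain ⟨h1, h2⟩ := qmin_bounds dy dx i hdy
    set q := qmin dy dx i with hqdef
    -- the y-step condition always fires in the y-major phase
    have hc2 : 2 * (dx - dy + i * dx - q * dy) < dx := by nlinarith
    rw [lineLoopA, if_neg hne]
    have hcast : ∀ j : Nat, i + ((j + 1 : Nat) : Int) = (i + 1) + (j : Int) := by
      intro j; push_cast; ring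
    by_cases hc1 : 2 * (dx - dy + i * dx - q * dy) > -dy
    · have hq1 : qmin dy dx (i + 1) = q + 1 := by
        apply qmin_eq _ _ _ _ hdy <;> nlinarith
      have key := ih fuel (i + 1) (by omega) (by omega) (by omega)
      rw [hq1] at key
      rw [if_pos hc1, if_pos hc2, if_pos hc2, if_pos hc1]
      rw [show x0 + sx * q + sx = x0 + sx * (q + 1) by ring,
          show y0 + sy * i + sy = y0 + sy * (i + 1) by ring,
          show dx - dy + i * dx - q * dy - dy + dx = dx - dy + (i + 1) * dx - (q + 1) * dy by ring,
          key]
      conv_rhs => rw [range_map_succ_shift]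
      congr 1
      · norm_num [hqdef]
      · refine List.map_congr_left ?_
        intro j _
        simp only [hcast]
    · have hq1 : qmin dy dx (i + 1) = q := by
        apply qmin_eq _ _ _ _ hdy <;> nlinarith
      have key := ih fuel (i + 1) (by omega) (by omega) (by omega)
      rw [hq1] at key
      rw [if_neg hc1, if_pos hc2, if_pos hc2, if_neg hc1]
      rw [show y0 + sy * i + sy = y0 + sy * (i + 1) by ring,
          show dx - dy + i * dx - q * dy + dx = dx - dy + (i + 1) * dx - q * dy by ring,
          key]
      conv_rhs => rw [range_map_succ_shift]
      congr 1
      · norm_num [hqdef]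
      · refine List.map_congr_left ?_
        intro j _
        simp only [hcast]

-- ===== VERDICT (by name: the statement is the Claim_ definition above) =====
theorem line_iter_spec : Claim_equal_line_iter := by
  unfold Claim_equal_line_iter
  rintro ⟨x0, y0⟩ ⟨x1, y1⟩ -
  unfold Spec_line_iter line_iter line_iter_alt
  simp only
  set dx := |x1 - x0| with hdxdef
  set dy := |y1 - y0| with hdydef
  set sx : Int := if x0 < x1 then 1 else -1 with hsxdef
  set sy : Int := if y0 < y1 then 1 else -1 with hsydef
  have hdx0 : 0 ≤ dx := abs_nonneg _
  have hdy0 : 0 ≤ dy := abs_nonneg _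
  have hsx : sx = 1 ∨ sx = -1 := by rw [hsxdef]; split <;> simp
  have hsy : sy = 1 ∨ sy = -1 := by rw [hsydef]; split <;> simp
  have hx1 : x1 = x0 + sx * dx := by
    rw [hsxdef, hdxdef]; rcases abs_cases (x1 - x0) with ⟨h, _⟩ | ⟨h, _⟩ <;> split_ifs <;> omega
  have hy1 : y1 = y0 + sy * dy := by
    rw [hsydef, hdydef]; rcases abs_cases (y1 - y0) with ⟨h, _⟩ | ⟨h, _⟩ <;> split_ifs <;> omega
  by_cases h0 : dx = 0 ∧ dy = 0
  · obtain ⟨h0x, h0y⟩ := h0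
    rw [if_pos ⟨h0x, h0y⟩, hx1, hy1, h0x, h0y]
    norm_num [lineLoopA]
  · rw [if_neg h0]
    by_cases hge : dx ≥ dy
    · have hdxpos : 0 < dx := by omega
      rw [if_pos hge]
      have key := loopA_xmajor x0 y0 sx sy dx dy hdxpos hdy0 hge hsx
        dx.toNat ((dx + dy).toNat + 1) 0 (by omega) le_rfl (by omega)
      rw [qmin_zero dx dy hdxpos] at key
      simp only [mul_zero, zero_mul, add_zero, sub_zero, zero_add] at key
      rw [hx1, hy1]
      rw [key, show (dx + 1).toNat = dx.toNat + 1 by omega]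
      refine List.map_congr_left ?_
      intro j _
      simp [qmin]
    · have hdypos : 0 < dy := by omega
      have hlt : dx < dy := by omega
      rw [if_neg (by omega : ¬ dx ≥ dy)]
      have key := loopA_ymajor x0 y0 sx sy dx dy hdypos hdx0 hlt hsy
        dy.toNat ((dx + dy).toNat + 1) 0 (by omega) le_rfl (by omega)
      rw [qmin_zero dy dx hdypos] at key
      simp only [mul_zero, zero_mul, add_zero, sub_zero, zero_add] at key
      rw [hx1, hy1]
      rw [key, show (dy + 1).toNat = dy.toNat + 1 by omega]
      refine List.map_congr_left ?_
      intro j _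
      simp [qmin]
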